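-- pv_equiv track=rewrite | github.com/Chissanu/KMITL | PCA/Week4/pca4.py | m06
-- ===== SOURCE A (Python) =====
-- def m06(n: int):
--     round1s = 0
--     sum = 0
--     while round1s < n:
--         round2s = 0
--         while round2s < (n*n):
--             sum += 1
--             round2s += 1
--         round1s += 1
--     return sum
--
-- n = 10
-- ===== SOURCE B (Python) =====
-- def m06(n: int):
--     # Closed form: the nested loops add 1 exactly n * n*n times for n > 0, else 0.
--     return max(n, 0) ** 3
-- ===== Notes on version B (the rewrite author's own statement) =====
-- stated objective: faster
-- what changed: Replaced the O(n^3) nested counting loops with the closed form max(n,0)**3.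
import Mathlib
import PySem

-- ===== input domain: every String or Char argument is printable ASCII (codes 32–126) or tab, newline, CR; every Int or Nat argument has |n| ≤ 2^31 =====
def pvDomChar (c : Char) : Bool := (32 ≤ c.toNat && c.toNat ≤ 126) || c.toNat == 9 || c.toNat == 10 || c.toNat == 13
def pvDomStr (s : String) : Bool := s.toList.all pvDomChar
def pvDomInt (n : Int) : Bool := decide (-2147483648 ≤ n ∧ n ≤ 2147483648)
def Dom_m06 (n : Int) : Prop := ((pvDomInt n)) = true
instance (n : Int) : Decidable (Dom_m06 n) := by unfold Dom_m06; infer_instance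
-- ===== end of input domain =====

-- B replaces A's O(n^3) nested counting loops with the closed form max(n,0)^3.

-- ===== PORT A =====
-- inner while: while round2s < n*n: sum += 1; round2s += 1
def m06Inner (n round2s sum : Int) : Int :=
  if round2s < n * n then m06Inner n (round2s + 1) (sum + 1) else sum
termination_by (n * n - round2s).toNat
decreasing_by omega

-- outer while: while round1s < n: (inner loop); round1s += 1
def m06Outer (n round1s sum : Int) : Int :=
  if round1s < n then m06Outer n (round1s + 1) (m06Inner n 0 sum) else sum
termination_by (n - round1s).toNat
decreasing_by omega

def m06 (n : Int) : Int := m06Outer n 0 0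

-- ===== PORT B =====
def m06_alt (n : Int) : Int := (max n 0) ^ 3

-- ===== PRECONDITION & SPEC =====
def Spec_m06 (n : Int) (out : Int) : Prop := out = m06_alt n
instance (n : Int) (out : Int) : Decidable (Spec_m06 n out) := by unfold Spec_m06; infer_instance

-- ===== CLAIM (what is proved, stated in full; the proofs are below) =====
def Claim_equal_m06 : Prop := ∀ (n : Int), Dom_m06 n → Spec_m06 n (m06 n)

-- ===== LEMMAS AND PROOFS =====
theorem m06Inner_eq (n round2s sum : Int) :
    m06Inner n round2s sum = sum + max (n * n - round2s) 0 := by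
  unfold m06Inner
  split
  · rw [m06Inner_eq n (round2s + 1) (sum + 1)]; omega
  · omega
termination_by (n * n - round2s).toNat
decreasing_by omega

theorem m06Outer_eq (n round1s sum : Int) :
    m06Outer n round1s sum = sum + max (n - round1s) 0 * max (n * n) 0 := by
  unfold m06Outer
  split
  · rw [m06Outer_eq n (round1s + 1), m06Inner_eq]
    have h : max (n * n - 0) 0 = max (n * n) 0 := by omega
    have h2 : max (n - round1s) 0 = max (n - (round1s + 1)) 0 + 1 := by omega
    rw [h, h2]; ring
  · have h2 : max (n - round1s) 0 = 0 := by omega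
    rw [h2]; ring
termination_by (n - round1s).toNat
decreasing_by omega

-- ===== VERDICT (by name: the statement is the Claim_ definition above) =====
theorem m06_spec : Claim_equal_m06 := by
  intro n _
  show m06 n = m06_alt n
  unfold m06 m06_alt
  rw [m06Outer_eq]
  by_cases h : n ≤ 0
  · have h1 : max n 0 = 0 := by omega
    have h2 : max (n - 0) 0 = 0 := by omega
    rw [h1, h2]; ring
  · have h : 0 < n := by omega
    have h1 : max n 0 = n := by omega
    have h2 : max (n - 0) 0 = n := by omega
    have h3 : max (n * n) 0 = n * n := by have := mul_pos h h; omega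
    rw [h1, h2, h3]; ring
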